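-- pv_equiv track=rewrite | github.com/kiryazovkosta/python-details | src/Advent_of_Code/2024/Day_02/red_nosed_reports.py | is_second_safe
-- ===== SOURCE A (Python) =====
-- def is_second_safe(levels: list[int]) -> bool:
--     is_safe = True
--     if levels[0] == levels[1]:
--         return False
--     order = 'asc' if levels[0] < levels[1] else 'desc'
--     for idx in range(0, len(levels) - 1):
--         diff = levels[idx] - levels[idx + 1]
--         if abs(diff) == 0 or abs(diff) > 3:
--             is_safe = False
--             break
--
--         if levels[idx] > levels[idx + 1] and order == "asc":
--             is_safe = False
--             break
--
--         if levels[idx] < levels[idx + 1] and order == "desc":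
--             is_safe = False
--             break
--
--     return is_safe
-- ===== SOURCE B (Python) =====
-- def is_second_safe(levels: list[int]) -> bool:
--     if levels[0] == levels[1]:
--         return False
--     diffs = [levels[i + 1] - levels[i] for i in range(len(levels) - 1)]
--     return all(1 <= d <= 3 for d in diffs) or all(-3 <= d <= -1 for d in diffs)
-- ===== Notes on version B (the rewrite author's own statement) =====
-- stated objective: simpler
-- what changed: B drops the order flag and the early-breaking stateful loop: it builds the difference list once and returns whether all diffs lie in [1,3] or all in [-3,-1].
import Mathlib
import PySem

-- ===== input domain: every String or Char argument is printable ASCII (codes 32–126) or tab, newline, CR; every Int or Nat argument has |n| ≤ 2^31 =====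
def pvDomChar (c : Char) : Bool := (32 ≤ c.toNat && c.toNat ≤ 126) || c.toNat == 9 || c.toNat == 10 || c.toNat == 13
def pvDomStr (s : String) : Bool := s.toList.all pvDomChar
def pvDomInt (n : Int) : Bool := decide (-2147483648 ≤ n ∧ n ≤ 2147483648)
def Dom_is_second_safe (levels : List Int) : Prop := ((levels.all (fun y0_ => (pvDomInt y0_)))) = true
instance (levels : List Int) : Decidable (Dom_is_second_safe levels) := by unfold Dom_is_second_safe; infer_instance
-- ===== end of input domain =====

-- B replaces A's order flag and early-breaking stateful loop by one prebuilt difference list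
-- checked against the two admissible monotone ranges (objective: simpler).


-- ===== PORT A =====
-- the body of A's for-iteration: the three break-tests in source order (false = break)
def isSecondSafeStep (a b : Int) (order : Bool) : Bool :=
  if (a - b).natAbs = 0 ∨ (a - b).natAbs > 3 then false
  else if a > b ∧ order = true then false
  else if a < b ∧ order = false then false
  else true

-- the for-loop with break: one recursive pass over the index list; a break returns false
def isSecondSafeLoop (levels : List Int) (order : Bool) : List Nat → Bool
  | [] => true
  | idx :: rest =>
    if isSecondSafeStep (levels.getD idx 0) (levels.getD (idx + 1) 0) order then
      isSecondSafeLoop levels order rest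
    else false

def is_second_safe (levels : List Int) : Bool :=
  if levels.getD 0 0 = levels.getD 1 0 then false
  else
    -- order = true ↔ 'asc'
    let order : Bool := decide (levels.getD 0 0 < levels.getD 1 0)
    isSecondSafeLoop levels order (List.range (levels.length - 1))

-- ===== PORT B =====
def is_second_safe_alt (levels : List Int) : Bool :=
  if levels.getD 0 0 = levels.getD 1 0 then false
  else
    let diffs := (List.range (levels.length - 1)).map
      (fun i => levels.getD (i + 1) 0 - levels.getD i 0)
    diffs.all (fun d => decide (1 ≤ d) && decide (d ≤ 3)) ||
      diffs.all (fun d => decide (-3 ≤ d) && decide (d ≤ -1))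

-- ===== PRECONDITION & SPEC =====
-- Pre_ excludes only lists of length < 2, on which Python A raises IndexError at levels[1].
def Pre_is_second_safe (levels : List Int) : Prop := 2 ≤ levels.length
instance (levels : List Int) : Decidable (Pre_is_second_safe levels) := by unfold Pre_is_second_safe; infer_instance
def pvWitness_is_second_safe : List Int := ([1, 2, 3])
def Spec_is_second_safe (levels : List Int) (out : Bool) : Prop := out = is_second_safe_alt levels
instance (levels : List Int) (out : Bool) : Decidable (Spec_is_second_safe levels out) := by unfold Spec_is_second_safe; infer_instance

-- ===== CLAIM (what is proved, stated in full; the proofs are below) =====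
def Claim_equal_is_second_safe : Prop := ∀ (levels : List Int), Dom_is_second_safe levels → Pre_is_second_safe levels → Spec_is_second_safe levels (is_second_safe levels)

-- ===== LEMMAS AND PROOFS =====

-- A's loop is the conjunction of its per-index checks
theorem loop_eq_all (levels : List Int) (order : Bool) (idxs : List Nat) :
    isSecondSafeLoop levels order idxs =
      idxs.all (fun idx => isSecondSafeStep (levels.getD idx 0) (levels.getD (idx + 1) 0) order) := by
  induction idxs with
  | nil => rfl
  | cons idx rest ih =>
    rw [List.all_cons, ← ih, isSecondSafeLoop]
    by_cases h : isSecondSafeStep (levels.getD idx 0) (levels.getD (idx + 1) 0) order = true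
    · rw [if_pos h, h, Bool.true_and]
    · rw [if_neg h, Bool.eq_false_iff.mpr h, Bool.false_and]

-- pointwise: A's ascending per-index check is 'diff in [1,3]'
theorem step_asc (a b : Int) :
    isSecondSafeStep a b true = (decide (1 ≤ b - a) && decide (b - a ≤ 3)) := by
  unfold isSecondSafeStep
  split_ifs with h1 h2 h3 <;> symm <;>
    simp only [Bool.and_eq_true, decide_eq_true_eq, Bool.and_eq_false_iff,
      decide_eq_false_iff_not, not_le, and_true, and_false, gt_iff_lt, not_or,
      Nat.not_lt] at * <;> omega

-- pointwise: A's descending per-index check is 'diff in [-3,-1]'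
theorem step_desc (a b : Int) :
    isSecondSafeStep a b false = (decide (-3 ≤ b - a) && decide (b - a ≤ -1)) := by
  unfold isSecondSafeStep
  split_ifs with h1 h2 h3 <;> symm <;>
    simp only [Bool.and_eq_true, decide_eq_true_eq, Bool.and_eq_false_iff,
      decide_eq_false_iff_not, not_le, and_true, and_false, gt_iff_lt, not_or,
      Nat.not_lt] at * <;> omega

-- if a predicate fails on the first diff, the 'all' over the diff list is false
theorem all_diffs_false (levels : List Int) (p : Int → Bool)
    (hn : 2 ≤ levels.length)
    (h0 : p (levels.getD 1 0 - levels.getD 0 0) = false) :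
    ((List.range (levels.length - 1)).map
      (fun i => levels.getD (i + 1) 0 - levels.getD i 0)).all p = false := by
  rw [List.all_eq_false]
  refine ⟨levels.getD 1 0 - levels.getD 0 0, ?_, by rw [h0]; simp⟩
  simp only [List.mem_map]
  exact ⟨0, by simp only [List.mem_range]; omega, rfl⟩

-- ===== VERDICT (by name: the statement is the Claim_ definition above) =====
theorem is_second_safe_spec : Claim_equal_is_second_safe := by
  intro levels _ hpre
  unfold Spec_is_second_safe is_second_safe is_second_safe_alt
  unfold Pre_is_second_safe at hpre
  by_cases heq : levels.getD 0 0 = levels.getD 1 0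
  · rw [if_pos heq, if_pos heq]
  · rw [if_neg heq, if_neg heq, loop_eq_all]
    by_cases hlt : levels.getD 0 0 < levels.getD 1 0
    · -- ascending: loop = all-pos; all-neg fails on the first diff
      have horder : decide (levels.getD 0 0 < levels.getD 1 0) = true := decide_eq_true hlt
      show _ = (((List.range (levels.length - 1)).map
            (fun i => levels.getD (i + 1) 0 - levels.getD i 0)).all
              (fun d => decide (1 ≤ d) && decide (d ≤ 3)) ||
          ((List.range (levels.length - 1)).map
            (fun i => levels.getD (i + 1) 0 - levels.getD i 0)).all
              (fun d => decide (-3 ≤ d) && decide (d ≤ -1)))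
      rw [horder,
        all_diffs_false levels (fun d => decide (-3 ≤ d) && decide (d ≤ -1)) hpre
          (by simp only [Bool.and_eq_false_iff, decide_eq_false_iff_not, not_le]; omega),
        Bool.or_false, List.all_map]
      exact congrArg (List.all (List.range (levels.length - 1)))
        (funext fun idx => step_asc (levels.getD idx 0) (levels.getD (idx + 1) 0))
    · -- descending: loop = all-neg; all-pos fails on the first diff
      have horder : decide (levels.getD 0 0 < levels.getD 1 0) = false := decide_eq_false hlt
      show _ = (((List.range (levels.length - 1)).map
            (fun i => levels.getD (i + 1) 0 - levels.getD i 0)).all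
              (fun d => decide (1 ≤ d) && decide (d ≤ 3)) ||
          ((List.range (levels.length - 1)).map
            (fun i => levels.getD (i + 1) 0 - levels.getD i 0)).all
              (fun d => decide (-3 ≤ d) && decide (d ≤ -1)))
      rw [horder,
        all_diffs_false levels (fun d => decide (1 ≤ d) && decide (d ≤ 3)) hpre
          (by simp only [Bool.and_eq_false_iff, decide_eq_false_iff_not, not_le]; omega),
        Bool.false_or, List.all_map]
      exact congrArg (List.all (List.range (levels.length - 1)))
        (funext fun idx => step_desc (levels.getD idx 0) (levels.getD (idx + 1) 0))
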